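-- pv_equiv track=rewrite | github.com/ssm7/FQH-Quasihole-Braiding | tools/KrylovSubspace/KrylovBuilder.py | generate_root_states
-- ===== SOURCE A (Python) =====
-- def generate_root_states(Nelec):
--     patterns = {
--         0: "100",
--         1: "010",
--         2: "001"
--     }
--
--     all_roots = []
--
--     for sector in range(3):
--         base = patterns[sector]
--
--         for slide in range(Nelec):
--             s = ""
--
--             s += "0" * sector
--
--             for i in range(Nelec):
--                 s += base
--                 if i == slide:
--                     s += "0"
--
--             all_roots.append(int(s, 2))
--
--     return all_roots
-- ===== SOURCE B (Python) =====
-- def generate_root_states(Nelec):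
--     out = []
--     for b in (4, 2, 1):
--         for slide in range(Nelec):
--             m = Nelec - 1 - slide
--             high = b * (8 ** (slide + 1) - 1) // 7
--             low = b * (8 ** m - 1) // 7
--             out.append((high << (1 + 3 * m)) | low)
--     return out
-- ===== Notes on version B (the rewrite author's own statement) =====
-- stated objective: faster
-- what changed: B replaces A's per-state construction and base-2 parsing of a 3*Nelec-character binary string by a closed-form arithmetic computation of each root integer (geometric-sum block values b*(8**m-1)//7 combined with a shift and an or), keeping the same sector/slide loop order.
import Mathlib
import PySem

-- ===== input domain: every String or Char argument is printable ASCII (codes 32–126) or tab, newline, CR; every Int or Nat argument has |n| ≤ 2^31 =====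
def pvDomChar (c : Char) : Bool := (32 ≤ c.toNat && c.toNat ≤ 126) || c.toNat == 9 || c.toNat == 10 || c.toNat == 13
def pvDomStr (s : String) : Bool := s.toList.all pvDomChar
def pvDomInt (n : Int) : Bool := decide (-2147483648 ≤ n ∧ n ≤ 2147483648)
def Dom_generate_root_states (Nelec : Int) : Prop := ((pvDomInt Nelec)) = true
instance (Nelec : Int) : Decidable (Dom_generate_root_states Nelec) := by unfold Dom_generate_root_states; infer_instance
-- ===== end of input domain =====

-- B computes each root integer by closed-form arithmetic (geometric-sum blocks, shift, or)
-- instead of A's per-state binary-string building and parsing.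


-- ===== PORT A =====
-- hand port of int(s, 2): exact on the strings this function builds (non-empty, only '0'/'1',
-- no sign / whitespace / underscores / '0b' prefix — the general primitive's extra cases never arise)
def pvIntOfBin (cs : List Char) : Int :=
  cs.foldl (fun acc c => 2 * acc + (if c = '1' then 1 else 0)) 0

def generate_root_states (Nelec : Int) : List Int :=
  let patterns : PySem.Dict Int (List Char) :=
    PySem.Dict.ofList [(0, "100".toList), (1, "010".toList), (2, "001".toList)]
  (PySem.List.pyRange 0 3 1).foldl (fun all_roots sector =>
    -- patterns[sector]: KeyError impossible, sector ∈ {0, 1, 2}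
    let base := PySem.Dict.getD patterns sector []
    (PySem.List.pyRange 0 Nelec 1).foldl (fun all_roots slide =>
      let s : List Char := []
      let s := s ++ List.replicate sector.toNat '0'   -- s += "0" * sector  (sector ≥ 0 here)
      let s := (PySem.List.pyRange 0 Nelec 1).foldl (fun s i =>
        let s := s ++ base
        if i = slide then s ++ "0".toList else s) s
      all_roots ++ [pvIntOfBin s]) all_roots) []

-- ===== PORT B =====
def generate_root_states_alt (Nelec : Int) : List Int :=
  [(4 : Int), 2, 1].foldl (fun out b =>
    (PySem.List.pyRange 0 Nelec 1).foldl (fun out slide =>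
      let m := Nelec - 1 - slide
      let high := PySem.Int.floordiv (b * (8 ^ (slide + 1).toNat - 1)) 7
      let low := PySem.Int.floordiv (b * (8 ^ m.toNat - 1)) 7
      out ++ [PySem.Int.bor (high <<< (1 + 3 * m).toNat) low]) out) []

-- ===== PRECONDITION & SPEC =====
def Spec_generate_root_states (Nelec : Int) (out : List Int) : Prop := out = generate_root_states_alt Nelec
instance (Nelec : Int) (out : List Int) : Decidable (Spec_generate_root_states Nelec out) := by unfold Spec_generate_root_states; infer_instance

-- ===== CLAIM (what is proved, stated in full; the proofs are below) =====
def Claim_equal_generate_root_states : Prop := ∀ (Nelec : Int), Dom_generate_root_states Nelec → Spec_generate_root_states Nelec (generate_root_states Nelec)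

-- ===== LEMMAS AND PROOFS =====

-- Nat-valued binary reader (proof mirror of pvIntOfBin)
def pvNatVal (cs : List Char) : Nat :=
  cs.foldl (fun acc c => 2 * acc + (if c = '1' then 1 else 0)) 0

-- m concatenated copies of a block
def pvRep (cs : List Char) : Nat → List Char
  | 0 => []
  | m + 1 => cs ++ pvRep cs m

-- geometric sum 1 + 8 + … + 8^(m-1)
def pvG : Nat → Nat
  | 0 => 0
  | m + 1 => 8 * pvG m + 1

theorem pvG_mul_seven (m : Nat) : 7 * pvG m + 1 = 8 ^ m := by
  induction m with
  | zero => simp [pvG]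
  | succ m ih => simp only [pvG, pow_succ]; omega

theorem pvIntOfBin_eq_natVal (cs : List Char) : pvIntOfBin cs = (pvNatVal cs : Int) := by
  suffices h : ∀ (a : Nat), cs.foldl (fun acc c => 2 * acc + (if c = '1' then 1 else 0)) ((a : Nat) : Int)
      = ((cs.foldl (fun acc c => 2 * acc + (if c = '1' then 1 else 0)) a : Nat) : Int) by
    simpa [pvIntOfBin, pvNatVal] using h 0
  induction cs with
  | nil => intro a; simp
  | cons c cs ih =>
      intro a
      simp only [List.foldl_cons]
      have : (2 * (a : Int) + (if c = '1' then 1 else 0))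
          = ((2 * a + (if c = '1' then 1 else 0) : Nat) : Int) := by
        split <;> push_cast <;> ring
      rw [this, ih]

theorem pvNatVal_foldl_from (cs : List Char) (a : Nat) :
    cs.foldl (fun acc c => 2 * acc + (if c = '1' then 1 else 0)) a
      = a * 2 ^ cs.length + pvNatVal cs := by
  induction cs generalizing a with
  | nil => simp [pvNatVal]
  | cons c cs ih =>
      simp only [List.foldl_cons, List.length_cons]
      rw [ih]
      have hv : pvNatVal (c :: cs)
          = (2 * 0 + (if c = '1' then 1 else 0)) * 2 ^ cs.length + pvNatVal cs := by
        conv_lhs => unfold pvNatVal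
        simp only [List.foldl_cons]
        rw [ih]
      rw [hv]
      ring

theorem pvNatVal_append (xs ys : List Char) :
    pvNatVal (xs ++ ys) = pvNatVal xs * 2 ^ ys.length + pvNatVal ys := by
  unfold pvNatVal
  rw [List.foldl_append]
  exact pvNatVal_foldl_from ys _

theorem pvNatVal_replicate_zero (k : Nat) : pvNatVal (List.replicate k '0') = 0 := by
  induction k with
  | zero => simp [pvNatVal]
  | succ k ih =>
      have h : List.replicate (k + 1) '0' = ['0'] ++ List.replicate k '0' := by
        simp [List.replicate_succ]
      rw [h, pvNatVal_append, ih]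
      simp [pvNatVal]

theorem pvRep_length (cs : List Char) (m : Nat) : (pvRep cs m).length = cs.length * m := by
  induction m with
  | zero => simp [pvRep]
  | succ m ih => simp [pvRep, ih]; ring

theorem pvNatVal_rep (cs : List Char) (bval : Nat) (hb : pvNatVal cs = bval)
    (hl : cs.length = 3) (m : Nat) : pvNatVal (pvRep cs m) = bval * pvG m := by
  induction m with
  | zero => simp [pvRep, pvNatVal, pvG]
  | succ m ih =>
      rw [pvRep, pvNatVal_append, ih, hb, pvRep_length, hl, pvG]
      have h8 : (2 : Nat) ^ (3 * m) = 8 ^ m := by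
        rw [pow_mul]; norm_num
      rw [h8]
      nlinarith [pvG_mul_seven m]

theorem pvRep_snoc (cs : List Char) (m : Nat) : pvRep cs m ++ cs = pvRep cs (m + 1) := by
  induction m with
  | zero => simp [pvRep]
  | succ m ih => simp only [pvRep, List.append_assoc, ih]

-- value of the full root string
theorem pvVal_total (base : List Char) (bval : Nat) (hb : pvNatVal base = bval)
    (hl : base.length = 3) (k J M : Nat) :
    pvNatVal (List.replicate k '0' ++ (pvRep base J ++ base ++ ('0' :: pvRep base M)))
      = bval * pvG (J + 1) * 2 ^ (1 + 3 * M) + bval * pvG M := by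
  rw [pvNatVal_append, pvNatVal_replicate_zero, zero_mul, zero_add]
  have h1 : pvRep base J ++ base ++ ('0' :: pvRep base M)
      = pvRep base (J + 1) ++ (['0'] ++ pvRep base M) := by
    rw [← pvRep_snoc]; simp [List.append_assoc]
  rw [h1, pvNatVal_append, pvNatVal_rep base bval hb hl]
  have h2 : pvNatVal (['0'] ++ pvRep base M) = bval * pvG M := by
    rw [pvNatVal_append, pvNatVal_rep base bval hb hl]
    simp [pvNatVal]
  rw [h2]
  have h3 : (['0'] ++ pvRep base M).length = 1 + 3 * M := by
    simp [pvRep_length base M, hl]; omega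
  rw [h3]

-- an if-free stretch of the loop just appends copies of the block
theorem pvFoldl_const (base : List Char) (j : Int) (l : List Int)
    (hne : ∀ x ∈ l, x ≠ j) (s : List Char) :
    l.foldl (fun s i => if i = j then (s ++ base) ++ "0".toList else s ++ base) s
      = s ++ pvRep base l.length := by
  induction l generalizing s with
  | nil => simp [pvRep]
  | cons x l ih =>
      simp only [List.foldl_cons, List.length_cons]
      rw [if_neg (hne x (List.mem_cons_self))]
      rw [ih (fun y hy => hne y (List.mem_cons_of_mem x hy))]
      show (s ++ base) ++ pvRep base l.length = s ++ pvRep base (l.length + 1)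
      simp only [pvRep, List.append_assoc]

-- the inner string-building loop, characterised
theorem pvInner_char (base : List Char) (n j : Int) (h0 : 0 ≤ j) (hjn : j < n) (s0 : List Char) :
    (PySem.List.pyRange 0 n 1).foldl (fun s i =>
        if i = j then (s ++ base) ++ "0".toList else s ++ base) s0
      = s0 ++ (pvRep base j.toNat ++ base ++ ('0' :: pvRep base (n - 1 - j).toNat)) := by
  have hsplit : PySem.List.pyRange 0 n 1
      = PySem.List.pyRange 0 j 1 ++ PySem.List.pyRange j n 1 :=
    PySem.List.pyRange_one_append 0 j n h0 (le_of_lt hjn)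
  have hcons : PySem.List.pyRange j n 1 = j :: PySem.List.pyRange (j + 1) n 1 :=
    PySem.List.pyRange_one_cons hjn
  rw [hsplit, List.foldl_append, hcons, List.foldl_cons]
  rw [pvFoldl_const base j _ (fun x hx => by
        have := (PySem.List.mem_pyRange_one).1 hx; omega) s0]
  rw [if_pos rfl]
  rw [pvFoldl_const base j _ (fun x hx => by
        have := (PySem.List.mem_pyRange_one).1 hx; omega)]
  rw [PySem.List.length_pyRange_one, PySem.List.length_pyRange_one]
  have e1 : (j - 0).toNat = j.toNat := by omega
  have e2 : (n - (j + 1)).toNat = (n - 1 - j).toNat := by omega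
  rw [e1, e2]
  show s0 ++ pvRep base j.toNat ++ base ++ "0".toList ++ pvRep base (n - 1 - j).toNat = _
  have hz : "0".toList = ['0'] := rfl
  rw [hz]
  simp [List.append_assoc]

-- disjoint or is add
theorem pvOr_shift (a c K : Nat) (h : c < 2 ^ K) : (a <<< K) ||| c = a * 2 ^ K + c := by
  induction K generalizing c with
  | zero =>
      have hc : c = 0 := by omega
      subst hc
      simp
  | succ K ih =>
      have h2 : c / 2 < 2 ^ K := by
        rw [pow_succ] at h; omega
      have hb : a <<< (K + 1) = Nat.bit false (a <<< K) := by
        rw [Nat.bit_false_apply, Nat.shiftLeft_eq, Nat.shiftLeft_eq, pow_succ]; ring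
      have hcbit : Nat.bit (decide (c % 2 = 1)) (c / 2) = c := by
        have := Nat.bit_decide_mod_two_eq_one_shiftRight_one c
        rwa [Nat.shiftRight_one] at this
      conv_lhs => rw [hb, ← hcbit]
      rw [Nat.lor_bit, Bool.false_or, Nat.bit_val, ih _ h2]
      have hval : 2 * (c / 2) + (decide (c % 2 = 1)).toNat = c := by
        rcases Nat.mod_two_eq_zero_or_one c with h | h <;> simp [h] <;> omega
      rw [pow_succ]
      nlinarith [hval]

-- B's closed form, in Nat terms
theorem pvB_elem (bval : Nat) (hbv : bval < 8) (n x : Int) (h0 : 0 ≤ x) (hx : x < n) :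
    PySem.Int.bor
      ((PySem.Int.floordiv ((bval : Int) * (8 ^ (x + 1).toNat - 1)) 7) <<< (1 + 3 * (n - 1 - x)).toNat)
      (PySem.Int.floordiv ((bval : Int) * (8 ^ (n - 1 - x).toNat - 1)) 7)
      = ((bval * pvG (x.toNat + 1) * 2 ^ (1 + 3 * (n - 1 - x).toNat) + bval * pvG (n - 1 - x).toNat : Nat) : Int) := by
  have hfd : ∀ (m : Nat), PySem.Int.floordiv ((bval : Int) * (8 ^ m - 1)) 7
      = ((bval * pvG m : Nat) : Int) := by
    intro m
    have h8 : ((8 : Int) ^ m - 1) = ((7 * pvG m : Nat) : Int) := by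
      have h := congrArg (Nat.cast : Nat → Int) (pvG_mul_seven m)
      push_cast at h ⊢
      linarith
    rw [h8, PySem.Int.floordiv_eq_ediv_of_pos (by norm_num)]
    push_cast
    rw [show (bval : Int) * (7 * (pvG m : Int)) = 7 * ((bval : Nat) * pvG m : Nat) by push_cast; ring]
    rw [Int.mul_ediv_cancel_left _ (by norm_num)]
    push_cast
    ring
  have hJ : (x + 1).toNat = x.toNat + 1 := by omega
  have hK : (1 + 3 * (n - 1 - x)).toNat = 1 + 3 * (n - 1 - x).toNat := by omega
  rw [hJ, hK, hfd, hfd]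
  set J := x.toNat
  set M := (n - 1 - x).toNat
  have hshift : (((bval * pvG (J + 1) : Nat) : Int) <<< (1 + 3 * M))
      = (((bval * pvG (J + 1)) <<< (1 + 3 * M) : Nat) : Int) := rfl
  rw [hshift, PySem.Int.bor_natCast]
  congr 1
  apply pvOr_shift
  calc bval * pvG M ≤ 7 * pvG M := Nat.mul_le_mul_right _ (by omega)
    _ < 8 ^ M := by have := pvG_mul_seven M; omega
    _ = 2 ^ (3 * M) := by rw [pow_mul]; norm_num
    _ < 2 ^ (1 + 3 * M) := Nat.pow_lt_pow_right (by norm_num) (by omega)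

-- per-element agreement between A's string value and B's closed form
theorem pvPointwise (base : List Char) (bval : Nat) (hb : pvNatVal base = bval)
    (hl : base.length = 3) (hbv : bval < 8) (k : Nat) (n x : Int) (h0 : 0 ≤ x) (hx : x < n) :
    pvIntOfBin ((PySem.List.pyRange 0 n 1).foldl (fun s i =>
          if i = x then (s ++ base) ++ "0".toList else s ++ base) (List.replicate k '0'))
      = PySem.Int.bor
          ((PySem.Int.floordiv ((bval : Int) * (8 ^ (x + 1).toNat - 1)) 7) <<< (1 + 3 * (n - 1 - x)).toNat)
          (PySem.Int.floordiv ((bval : Int) * (8 ^ (n - 1 - x).toNat - 1)) 7) := by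
  rw [pvInner_char base n x h0 hx, pvIntOfBin_eq_natVal,
      pvVal_total base bval hb hl, pvB_elem bval hbv n x h0 hx]

-- ===== VERDICT (by name: the statement is the Claim_ definition above) =====
theorem generate_root_states_spec : Claim_equal_generate_root_states := by
  intro Nelec _
  unfold Spec_generate_root_states generate_root_states generate_root_states_alt
  have hr3 : PySem.List.pyRange 0 3 1 = [0, 1, 2] := by decide
  rw [hr3]
  simp only [List.foldl_cons, List.foldl_nil]
  have hp0 : PySem.Dict.getD (PySem.Dict.ofList
      [((0 : Int), "100".toList), (1, "010".toList), (2, "001".toList)]) 0 [] = "100".toList := by decide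
  have hp1 : PySem.Dict.getD (PySem.Dict.ofList
      [((0 : Int), "100".toList), (1, "010".toList), (2, "001".toList)]) 1 [] = "010".toList := by decide
  have hp2 : PySem.Dict.getD (PySem.Dict.ofList
      [((0 : Int), "100".toList), (1, "010".toList), (2, "001".toList)]) 2 [] = "001".toList := by decide
  rw [hp0, hp1, hp2]
  rw [PySem.List.foldl_append_singleton_eq_map, PySem.List.foldl_append_singleton_eq_map,
      PySem.List.foldl_append_singleton_eq_map, PySem.List.foldl_append_singleton_eq_map,
      PySem.List.foldl_append_singleton_eq_map, PySem.List.foldl_append_singleton_eq_map]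
  simp only [List.nil_append]
  have key : ∀ (base : List Char) (bval : Nat), pvNatVal base = bval → base.length = 3 →
      bval < 8 → ∀ (k : Nat),
      (PySem.List.pyRange 0 Nelec 1).map (fun slide =>
          pvIntOfBin ((PySem.List.pyRange 0 Nelec 1).foldl (fun s i =>
            if i = slide then (s ++ base) ++ "0".toList else s ++ base) (List.replicate k '0')))
        = (PySem.List.pyRange 0 Nelec 1).map (fun slide =>
            PySem.Int.bor
              ((PySem.Int.floordiv ((bval : Int) * (8 ^ (slide + 1).toNat - 1)) 7)
                <<< (1 + 3 * (Nelec - 1 - slide)).toNat)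
              (PySem.Int.floordiv ((bval : Int) * (8 ^ (Nelec - 1 - slide).toNat - 1)) 7)) := by
    intro base bval hb hl hbv k
    apply List.map_congr_left
    intro x hx
    have hmem := (PySem.List.mem_pyRange_one).1 hx
    exact pvPointwise base bval hb hl hbv k Nelec x (by omega) (by omega)
  rw [key "100".toList 4 (by decide) (by decide) (by norm_num) ((0 : Int).toNat),
      key "010".toList 2 (by decide) (by decide) (by norm_num) ((1 : Int).toNat),
      key "001".toList 1 (by decide) (by decide) (by norm_num) ((2 : Int).toNat)]
  norm_num
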